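-- pv_equiv track=rewrite | github.com/DuesanNoften/Proyecto_programado_3 | funcionalidad.py | string_replace
-- ===== SOURCE A (Python) =====
-- def string_replace(string,remplazado,remplazador):
--     len_str = len(string)
--     nuevo_str=''
--     if string[0] == remplazado:
--         nuevo_str+=remplazador
--     else:
--         nuevo_str+=string[0]
--     i=1
--     elemento_anterior=string[0]
--     while i != len_str:
--         if elemento_anterior == remplazado and string[i] == elemento_anterior:
--             i+=1
--             continue
--         else:
--             if string[i] == remplazado:
--                 nuevo_str+=remplazador
--             else:
--                 nuevo_str+=string[i]
--         elemento_anterior=string[i]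
--         i+=1
--     return nuevo_str
-- ===== SOURCE B (Python) =====
-- def string_replace(string, remplazado, remplazador):
--     # run-grouping scan: emit one remplazador per maximal run of the
--     # replaced character, other runs unchanged
--     out = []
--     i = 0
--     n = len(string)
--     while i < n:
--         j = i
--         while j < n and string[j] == string[i]:
--             j += 1
--         if string[i] == remplazado:
--             out.append(remplazador)
--         else:
--             out.append(string[i:j])
--         i = j
--     return ''.join(out)
-- ===== Notes on version B (the rewrite author's own statement) =====
-- stated objective: faster
-- what changed: Replaced A's previous-character state machine (index loop with continue-based run skipping and repeated str += concatenation) by a two-pointer maximal-run scan that emits one remplazador per run of the replaced character, copies other runs as slices, and joins the pieces once.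
import Mathlib
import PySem

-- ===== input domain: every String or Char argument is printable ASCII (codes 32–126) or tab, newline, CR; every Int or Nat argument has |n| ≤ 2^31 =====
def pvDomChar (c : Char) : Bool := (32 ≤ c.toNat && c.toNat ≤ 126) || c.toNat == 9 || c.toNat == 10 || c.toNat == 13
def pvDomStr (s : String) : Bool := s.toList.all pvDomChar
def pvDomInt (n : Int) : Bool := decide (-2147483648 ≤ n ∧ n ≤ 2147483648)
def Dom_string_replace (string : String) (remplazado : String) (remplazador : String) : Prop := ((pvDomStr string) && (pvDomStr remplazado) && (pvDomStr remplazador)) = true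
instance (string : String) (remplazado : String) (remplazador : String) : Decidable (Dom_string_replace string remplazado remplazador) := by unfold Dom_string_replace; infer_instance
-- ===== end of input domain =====

-- B replaces A's previous-character state machine (with repeated str += concatenation) by a two-pointer maximal-run scan joined once (faster).
-- Both ports compute on List Char (str values as their character lists, per PySem convention) and wrap with String.ofList.

-- ===== PORT A =====
-- A's while loop over i with state (elemento_anterior, nuevo_str): structural recursion on the rest of the characters.
def srALoop (rest : List Char) (prev : Char) (rem rep acc : List Char) : List Char :=
  match rest with
  | [] => acc
  | c :: t =>
    if [prev] = rem ∧ c = prev then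
      srALoop t prev rem rep acc
    else
      srALoop t c rem rep (acc ++ (if [c] = rem then rep else [c]))

def string_replace (string : String) (remplazado : String) (remplazador : String) : String :=
  String.ofList
    (match string.toList with
     | [] => []   -- Python raises IndexError on string[0] here; excluded by Pre_
     | c :: t =>
       srALoop t c remplazado.toList remplazador.toList
         (if [c] = remplazado.toList then remplazador.toList else [c]))

-- ===== PORT B =====
-- B's inner while (extend j over the current run) is List.span; the outer while is recursion on the remainder;
-- ''.join of the emitted pieces is List.flatten.
def srBGroups (l : List Char) : List (Char × List Char) :=
  match l with
  | [] => []
  | c :: t =>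
    let p := t.span (fun x => x = c)
    (c, c :: p.1) :: srBGroups p.2
termination_by l.length
decreasing_by
  simp only [List.span_eq_takeWhile_dropWhile]
  have := List.length_dropWhile_le (p := fun x => x = c) (l := t)
  simp; omega

def string_replace_alt (string : String) (remplazado : String) (remplazador : String) : String :=
  String.ofList
    (((srBGroups string.toList).map
        (fun g => if [g.1] = remplazado.toList then remplazador.toList else g.2)).flatten)

-- ===== PRECONDITION & SPEC =====
-- Pre_ excludes only the empty string, on which A raises IndexError at string[0].
def Pre_string_replace (string : String) (remplazado : String) (remplazador : String) : Prop := string ≠ ""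
instance (string : String) (remplazado : String) (remplazador : String) : Decidable (Pre_string_replace string remplazado remplazador) := by unfold Pre_string_replace; infer_instance
def pvWitness_string_replace : String × String × String := ("aab", "a", "X")

def Spec_string_replace (string : String) (remplazado : String) (remplazador : String) (out : String) : Prop := out = string_replace_alt string remplazado remplazador
instance (string : String) (remplazado : String) (remplazador : String) (out : String) : Decidable (Spec_string_replace string remplazado remplazador out) := by unfold Spec_string_replace; infer_instance

-- ===== CLAIM (what is proved, stated in full; the proofs are below) =====
def Claim_equal_string_replace : Prop := ∀ (string : String) (remplazado : String) (remplazador : String), Dom_string_replace string remplazado remplazador → Pre_string_replace string remplazado remplazador → Spec_string_replace string remplazado remplazador (string_replace string remplazado remplazador)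

-- ===== LEMMAS AND PROOFS =====

-- pull the accumulator out of A's loop
theorem srALoop_acc (rest : List Char) (prev : Char) (rem rep acc : List Char) :
    srALoop rest prev rem rep acc = acc ++ srALoop rest prev rem rep [] := by
  induction rest generalizing prev acc with
  | nil => simp [srALoop]
  | cons c t ih =>
    simp only [srALoop]
    split
    · exact ih _ _
    · rw [ih _ (acc ++ _), ih _ ([] ++ _)]
      simp

-- B's value as a function of the char list
def srG (rem rep : List Char) (l : List Char) : List Char :=
  ((srBGroups l).map (fun g => if [g.1] = rem then rep else g.2)).flatten

-- "fresh start" form of A's loop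
def srF (rem rep : List Char) (l : List Char) : List Char :=
  match l with
  | [] => []
  | c :: t => (if [c] = rem then rep else [c]) ++ srALoop t c rem rep []

-- A's loop after a replaced character skips the rest of its run
theorem srALoop_skip (t : List Char) (c : Char) (rem rep : List Char) (h : [c] = rem) :
    srALoop t c rem rep [] = srF rem rep (t.dropWhile (fun x => x = c)) := by
  induction t with
  | nil => simp [srALoop, srF]
  | cons x t' ih =>
    by_cases hx : x = c
    · subst hx
      simp only [srALoop, List.dropWhile]
      rw [if_pos ⟨h, trivial⟩]
      simpa using ih
    · simp only [srALoop, List.dropWhile]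
      rw [if_neg (by simp [hx]), srALoop_acc]
      simp [srF, hx]

-- A's loop after a non-replaced character copies the rest of its run
theorem srALoop_copy (t : List Char) (c : Char) (rem rep : List Char) (h : ¬ [c] = rem) :
    srALoop t c rem rep [] =
      t.takeWhile (fun x => x = c) ++ srF rem rep (t.dropWhile (fun x => x = c)) := by
  induction t with
  | nil => simp [srALoop, srF]
  | cons x t' ih =>
    by_cases hx : x = c
    · subst hx
      simp only [srALoop, List.takeWhile, List.dropWhile]
      rw [if_neg (by simp [h]), srALoop_acc]
      simp [h, ih]
    · simp only [srALoop, List.takeWhile, List.dropWhile]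
      rw [if_neg (by simp [hx]), srALoop_acc]
      simp [hx, srF]

theorem srF_eq_srG (rem rep : List Char) (l : List Char) : srF rem rep l = srG rem rep l := by
  induction l using srBGroups.induct with
  | case1 => simp [srF, srG, srBGroups]
  | case2 c t p ih =>
    have h1 : p.1 = t.takeWhile (fun x => x = c) := by
      rw [show p = t.span (fun x => x = c) from rfl, List.span_eq_takeWhile_dropWhile]
    have h2 : p.2 = t.dropWhile (fun x => x = c) := by
      rw [show p = t.span (fun x => x = c) from rfl, List.span_eq_takeWhile_dropWhile]
    show (if [c] = rem then rep else [c]) ++ srALoop t c rem rep [] =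
      ((srBGroups (c :: t)).map (fun g => if [g.1] = rem then rep else g.2)).flatten
    rw [srBGroups]
    simp only [List.map_cons, List.flatten_cons]
    by_cases h : [c] = rem
    · rw [if_pos h, if_pos h, srALoop_skip _ _ _ _ h, ← h2, ih]
      rfl
    · rw [if_neg h, if_neg h, srALoop_copy _ _ _ _ h, ← h2, ih, ← h1]
      rfl

-- ===== VERDICT (by name: the statement is the Claim_ definition above) =====
theorem string_replace_spec : Claim_equal_string_replace := by
  intro s rem rep _ hpre
  unfold Spec_string_replace string_replace string_replace_alt
  cases hl : s.toList with
  | nil =>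
    exfalso
    apply hpre
    have := congrArg String.ofList hl
    simpa using this
  | cons c t =>
    refine congrArg String.ofList ?_
    show srALoop t c rem.toList rep.toList (if [c] = rem.toList then rep.toList else [c]) = _
    rw [srALoop_acc]
    have := srF_eq_srG rem.toList rep.toList (c :: t)
    simp only [srF] at this
    rw [this, srG]
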